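-- pv_equiv track=rewrite | github.com/Stewiclez27425/UNG-DUNG-QUAN-LY-KHACH-HANG | validators.py | sanitize_customer_data
-- ===== SOURCE A (Python) =====
-- from typing import Dict, List, Optional, Tuple
--
-- def sanitize_customer_data(data: Dict) -> Dict:
--     """Sanitize customer data"""
--     sanitized = {}
--
--     # Sanitize string fields
--     string_fields = ['name', 'phone', 'email', 'address', 'code']
--     for field in string_fields:
--         if field in data and data[field]:
--             # Strip whitespace and limit length
--             value = str(data[field]).strip()
--             if field == 'name':
--                 sanitized[field] = value[:100]  # Max 100 characters
--             elif field == 'phone':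
--                 sanitized[field] = value[:15]   # Max 15 characters
--             elif field == 'email':
--                 sanitized[field] = value[:255].lower()  # Max 255 characters, lowercase
--             elif field == 'address':
--                 sanitized[field] = value[:500]  # Max 500 characters
--             elif field == 'code':
--                 sanitized[field] = value.upper()  # Uppercase
--         else:
--             sanitized[field] = data.get(field, '')
--
--     return sanitized
-- ===== SOURCE B (Python) =====
-- # Staged-pipeline rewrite: instead of A's single pass that finishes each field with an
-- # if/elif chain, B first copies all raw fields, then applies each kind of sanitization
-- # as its own whole-dict pass (strip pass, truncation pass, casing fix-ups).
--
-- _FIELDS = ('name', 'phone', 'email', 'address', 'code')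
-- _LIMITS = {'name': 100, 'phone': 15, 'email': 255, 'address': 500}
--
-- def sanitize_customer_data(data):
--     """Sanitize customer data"""
--     # stage 1: copy the raw fields
--     out = {f: data.get(f, '') for f in _FIELDS}
--     touched = [f for f in _FIELDS if f in data and data[f]]
--     # stage 2: stringify + strip every touched field
--     for f in touched:
--         out[f] = str(data[f]).strip()
--     # stage 3: truncate every touched field that has a length limit
--     for f in touched:
--         if f in _LIMITS:
--             out[f] = out[f][:_LIMITS[f]]
--     # stage 4: casing fix-ups
--     if 'email' in touched:
--         out['email'] = out['email'].lower()
--     if 'code' in touched: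
--         out['code'] = out['code'].upper()
--     return out
-- ===== Notes on version B (the rewrite author's own statement) =====
-- stated objective: alternative
-- what changed: Replaces A's single pass that completes each field via a five-way if/elif chain by a staged pipeline over the whole dict: a raw-copy stage, a strip stage, a table-driven truncation stage, and final casing fix-ups for email/code.
import Mathlib
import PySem

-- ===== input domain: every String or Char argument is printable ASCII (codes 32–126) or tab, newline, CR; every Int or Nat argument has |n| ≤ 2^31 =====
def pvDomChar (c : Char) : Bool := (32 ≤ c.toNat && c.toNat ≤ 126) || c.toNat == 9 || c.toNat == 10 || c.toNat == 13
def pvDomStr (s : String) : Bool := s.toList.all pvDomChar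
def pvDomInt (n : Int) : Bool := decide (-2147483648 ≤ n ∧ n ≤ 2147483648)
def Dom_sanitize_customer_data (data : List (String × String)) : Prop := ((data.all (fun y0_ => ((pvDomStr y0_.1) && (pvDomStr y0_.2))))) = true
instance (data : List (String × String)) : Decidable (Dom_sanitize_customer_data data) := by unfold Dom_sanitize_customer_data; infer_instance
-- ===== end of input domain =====

-- B replaces A's single pass with a per-field if/elif chain by a staged pipeline
-- (raw copy, strip pass, table-driven truncation pass, casing fix-ups); objective: alternative.

-- ===== PORT A =====
-- literal transliteration of A: loop over the field names, if/elif chain per field,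
-- building a Python dict (insertion-ordered) and returning it
def sanitize_customer_data (data : List (String × String)) : List (String × String) :=
  let d := PySem.Dict.mk data
  let sanitized : PySem.Dict String String := PySem.Dict.mk []
  let string_fields := ["name", "phone", "email", "address", "code"]
  let sanitized := string_fields.foldl (fun sanitized field =>
    match PySem.Dict.get? d field with
    | some v =>
      if v ≠ "" then
        -- value = str(data[field]).strip()  (the values are strings, so str() is the identity)
        let value := PySem.Str.strip v
        if field == "name" then PySem.Dict.insert sanitized field (PySem.Str.slice value none (some 100))
        else if field == "phone" then PySem.Dict.insert sanitized field (PySem.Str.slice value none (some 15))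
        else if field == "email" then PySem.Dict.insert sanitized field (PySem.Str.lower (PySem.Str.slice value none (some 255)))
        else if field == "address" then PySem.Dict.insert sanitized field (PySem.Str.slice value none (some 500))
        else if field == "code" then PySem.Dict.insert sanitized field (PySem.Str.upper value)
        else sanitized
      else PySem.Dict.insert sanitized field (PySem.Dict.getD d field "")
    | none => PySem.Dict.insert sanitized field (PySem.Dict.getD d field "")) sanitized
  sanitized.items

-- ===== PORT B =====
-- the module-level tables of Source B
def pvFields : List String := ["name", "phone", "email", "address", "code"]
def pvLimits : PySem.Dict String Int :=
  PySem.Dict.mk [("name", 100), ("phone", 15), ("email", 255), ("address", 500)]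

-- staged pipeline of Source B: raw copy, strip pass, truncation pass, casing fix-ups
def sanitize_customer_data_alt (data : List (String × String)) : List (String × String) :=
  let d := PySem.Dict.mk data
  -- stage 1: out = {f: data.get(f, '') for f in _FIELDS}
  let out : PySem.Dict String String :=
    PySem.Dict.mk (pvFields.map (fun f => (f, PySem.Dict.getD d f "")))
  -- touched = [f for f in _FIELDS if f in data and data[f]]  (only "" is falsy here)
  let touched := pvFields.filter (fun f => PySem.Dict.contains d f && PySem.Dict.getD d f "" != "")
  -- stage 2: out[f] = str(data[f]).strip()  (values are strings, str() is the identity;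
  -- data[f] cannot raise because f ∈ touched, so it is d's getD)
  let out := touched.foldl (fun o f => PySem.Dict.insert o f (PySem.Str.strip (PySem.Dict.getD d f ""))) out
  -- stage 3: if f in _LIMITS: out[f] = out[f][:_LIMITS[f]]  (out[f] always present: getD)
  let out := touched.foldl (fun o f =>
    if PySem.Dict.contains pvLimits f then
      PySem.Dict.insert o f (PySem.Str.slice (PySem.Dict.getD o f "") none (some (PySem.Dict.getD pvLimits f 0)))
    else o) out
  -- stage 4: casing fix-ups
  let out := if touched.contains "email" then
      PySem.Dict.insert out "email" (PySem.Str.lower (PySem.Dict.getD out "email" "")) else out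
  let out := if touched.contains "code" then
      PySem.Dict.insert out "code" (PySem.Str.upper (PySem.Dict.getD out "code" "")) else out
  out.items

-- ===== PRECONDITION & SPEC =====
def Spec_sanitize_customer_data (data : List (String × String)) (out : List (String × String)) : Prop := out = sanitize_customer_data_alt data
instance (data : List (String × String)) (out : List (String × String)) : Decidable (Spec_sanitize_customer_data data out) := by unfold Spec_sanitize_customer_data; infer_instance

-- ===== CLAIM (what is proved, stated in full; the proofs are below) =====
def Claim_equal_sanitize_customer_data : Prop := ∀ (data : List (String × String)), Dom_sanitize_customer_data data → Spec_sanitize_customer_data data (sanitize_customer_data data)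

-- ===== LEMMAS AND PROOFS =====

-- the value A stores for a given field (read off A's if/elif chain)
def pvValA (d : PySem.Dict String String) (field : String) : String :=
  match PySem.Dict.get? d field with
  | some v =>
    if v ≠ "" then
      let value := PySem.Str.strip v
      if field == "name" then PySem.Str.slice value none (some 100)
      else if field == "phone" then PySem.Str.slice value none (some 15)
      else if field == "email" then PySem.Str.lower (PySem.Str.slice value none (some 255))
      else if field == "address" then PySem.Str.slice value none (some 500)
      else PySem.Str.upper value
    else PySem.Dict.getD d field ""
  | none => PySem.Dict.getD d field ""

theorem pvA_eq_map (data : List (String × String)) :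
    sanitize_customer_data data =
      pvFields.map (fun f => (f, pvValA (PySem.Dict.mk data) f)) := by
  unfold sanitize_customer_data
  dsimp only
  rw [PySem.List.foldl_congr_mem _ _
        (fun s f => PySem.Dict.insert s f (pvValA (PySem.Dict.mk data) f)) _ ?_]
  · rw [PySem.Dict.items_foldl_insert_fresh _ _ _ _ ?_ ?_]
    · simp [pvFields]
    · intro a _; simp [PySem.Dict.contains]
    · decide
  · intro acc x hx
    fin_cases hx <;>
      (simp only [pvValA]
       cases PySem.Dict.get? (PySem.Dict.mk data) _ <;> simp
       split_ifs <;> rfl)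

-- a fold that conditionally overwrites existing, pairwise-distinct keys rewrites the
-- items list entrywise (B's stages 2 and 3 both have this shape)
theorem pv_foldl_insert_cond_items {ν : Type} (dflt : ν) (c : String → Bool) (u : String → ν → ν) :
    ∀ (touched : List String) (d : PySem.Dict String ν), d.keys.Nodup → touched.Nodup →
      (∀ f ∈ touched, d.contains f = true) →
      (touched.foldl (fun o f => if c f then o.insert f (u f (o.getD f dflt)) else o) d).items
        = d.items.map (fun p => if p.1 ∈ touched ∧ c p.1 then (p.1, u p.1 (d.getD p.1 dflt)) else p)
  | [], d, _, _, _ => by simp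
  | f :: fs, d, hnd, hn, hc => by
    have hf : d.contains f = true := hc f (by simp)
    have hfs : f ∉ fs := (List.nodup_cons.mp hn).1
    have hn' : fs.Nodup := (List.nodup_cons.mp hn).2
    simp only [List.foldl_cons]
    by_cases hcf : c f = true
    · simp only [hcf, if_true]
      have hkeys : (d.insert f (u f (d.getD f dflt))).keys = d.keys :=
        PySem.Dict.keys_insert_of_contains d _ hf
      rw [pv_foldl_insert_cond_items dflt c u fs _ (by rw [hkeys]; exact hnd) hn'
            (by intro x hx
                rw [PySem.Dict.contains_eq_decide_mem_keys, hkeys,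
                    ← PySem.Dict.contains_eq_decide_mem_keys]
                exact hc x (by simp [hx]))]
      rw [PySem.Dict.items_insert_of_contains d _ hf, List.map_map]
      apply List.map_congr_left
      intro p hp
      by_cases hpf : p.1 = f
      · simp [hpf, hfs, hcf, PySem.Dict.getD_insert]
      · have hb : (p.1 == f) = false := by simp [hpf]
        simp only [Function.comp, hb, Bool.false_eq_true, if_false,
          List.mem_cons, hpf, false_or]
        by_cases hm : p.1 ∈ fs
        · simp [hm, PySem.Dict.getD_insert, hpf]
        · simp [hm]
    · simp only [hcf, Bool.false_eq_true, if_false]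
      rw [pv_foldl_insert_cond_items dflt c u fs d hnd hn'
            (fun x hx => hc x (by simp [hx]))]
      apply List.map_congr_left
      intro p hp
      by_cases hpf : p.1 = f
      · simp [hpf, hfs, hcf]
      · simp [List.mem_cons, hpf]

-- B's per-field final value, read off the pipeline
def pvValB (d : PySem.Dict String String) (f : String) : String :=
  if PySem.Dict.contains d f && PySem.Dict.getD d f "" != "" then
    let w2 := PySem.Str.strip (PySem.Dict.getD d f "")
    let w3 := if PySem.Dict.contains pvLimits f then
        PySem.Str.slice w2 none (some (PySem.Dict.getD pvLimits f 0)) else w2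
    if f = "email" then PySem.Str.lower w3
    else if f = "code" then PySem.Str.upper w3
    else w3
  else PySem.Dict.getD d f ""

theorem pvB_eq_map (data : List (String × String)) :
    sanitize_customer_data_alt data =
      pvFields.map (fun f => (f, pvValB (PySem.Dict.mk data) f)) := by
  unfold sanitize_customer_data_alt
  dsimp only
  set d := PySem.Dict.mk data with hd
  set P : String → Bool := fun f => PySem.Dict.contains d f && PySem.Dict.getD d f "" != "" with hP
  -- stage 2
  -- generic facts about a literal field dict
  have hnodup : ∀ (w : String → String),
      (PySem.Dict.mk (pvFields.map (fun g => (g, w g)))).keys.Nodup := by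
    intro w; rw [PySem.Dict.keys_mk, List.map_map]
    have : ((fun (x : String × String) => x.1) ∘ (fun g => (g, w g))) = id := rfl
    rw [this, List.map_id]; decide
  have hget : ∀ (w : String → String) f, f ∈ pvFields →
      PySem.Dict.getD (PySem.Dict.mk (pvFields.map (fun g => (g, w g)))) f "" = w f := by
    intro w f hf
    exact PySem.Dict.getD_of_mem_items _ (List.mem_map_of_mem (f := fun g => (g, w g)) hf) (hnodup w) _
  have hcont : ∀ (w : String → String) f, f ∈ pvFields →
      PySem.Dict.contains (PySem.Dict.mk (pvFields.map (fun g => (g, w g)))) f = true := by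
    intro w f hf
    rw [PySem.Dict.contains_eq_decide_mem_keys, PySem.Dict.keys_mk, List.map_map]
    simpa using hf
  have htn : (pvFields.filter P).Nodup := List.Nodup.filter _ (by decide)
  have htsub : ∀ f ∈ pvFields.filter P, f ∈ pvFields := fun f hf => (List.mem_filter.mp hf).1
  -- the raw copy is the literal field dict over w0
  have hbase : PySem.Dict.mk (pvFields.map fun f => (f, PySem.Dict.getD d f "")) =
      PySem.Dict.mk (pvFields.map (fun g => (g, (fun f => PySem.Dict.getD d f "") g))) := rfl
  -- stage 2 result as a literal field dict
  have h2 : ((pvFields.filter P).foldl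
        (fun o f => PySem.Dict.insert o f (PySem.Str.strip (PySem.Dict.getD d f "")))
        (PySem.Dict.mk (pvFields.map fun f => (f, PySem.Dict.getD d f "")))) =
      PySem.Dict.mk (pvFields.map (fun g => (g,
        (fun f => if P f then PySem.Str.strip (PySem.Dict.getD d f "") else PySem.Dict.getD d f "") g))) := by
    apply PySem.Dict.ext
    rw [show (fun (o : PySem.Dict String String) f => PySem.Dict.insert o f (PySem.Str.strip (PySem.Dict.getD d f ""))) =
        (fun o f => if (fun _ => true) f then PySem.Dict.insert o f ((fun f (_ : String) => PySem.Str.strip (PySem.Dict.getD d f "")) f (PySem.Dict.getD o f "")) else o) from rfl]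
    rw [hbase, pv_foldl_insert_cond_items "" (fun _ => true)
          (fun f _ => PySem.Str.strip (PySem.Dict.getD d f "")) (pvFields.filter P) _
          (hnodup _) htn (fun f hf => hcont _ f (htsub f hf))]
    dsimp only
    rw [List.map_map]
    apply List.map_congr_left
    intro f hf
    by_cases hp : P f = true
    · simp [Function.comp, List.mem_filter, hf, hp]
    · simp [Function.comp, List.mem_filter, hf, hp]
  rw [h2]
  set w2 : String → String := fun f => if P f then PySem.Str.strip (PySem.Dict.getD d f "") else PySem.Dict.getD d f "" with hw2
  -- stage 3 result as a literal field dict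
  have h3 : ((pvFields.filter P).foldl
        (fun o f => if PySem.Dict.contains pvLimits f then
          PySem.Dict.insert o f (PySem.Str.slice (PySem.Dict.getD o f "") none (some (PySem.Dict.getD pvLimits f 0)))
        else o)
        (PySem.Dict.mk (pvFields.map (fun g => (g, w2 g))))) =
      PySem.Dict.mk (pvFields.map (fun g => (g,
        (fun f => if P f = true ∧ PySem.Dict.contains pvLimits f = true then
            PySem.Str.slice (w2 f) none (some (PySem.Dict.getD pvLimits f 0)) else w2 f) g))) := by
    apply PySem.Dict.ext
    rw [pv_foldl_insert_cond_items "" (fun f => PySem.Dict.contains pvLimits f)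
          (fun f v => PySem.Str.slice v none (some (PySem.Dict.getD pvLimits f 0))) (pvFields.filter P) _
          (hnodup _) htn (fun f hf => hcont _ f (htsub f hf))]
    dsimp only
    rw [List.map_map]
    apply List.map_congr_left
    intro f hf
    by_cases hp : P f = true <;> by_cases hl : PySem.Dict.contains pvLimits f = true <;>
      simp [Function.comp, List.mem_filter, hf, hp, hl, hget w2 f hf]
  rw [h3]
  set w3 : String → String := fun f => if P f = true ∧ PySem.Dict.contains pvLimits f = true then
      PySem.Str.slice (w2 f) none (some (PySem.Dict.getD pvLimits f 0)) else w2 f with hw3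
  -- a casing fix-up step rewrites one field of a literal field dict
  have hstep : ∀ (w : String → String) (k : String) (t : String → String), k ∈ pvFields →
      (if (pvFields.filter P).contains k then
          PySem.Dict.insert (PySem.Dict.mk (pvFields.map (fun g => (g, w g)))) k
            (t (PySem.Dict.getD (PySem.Dict.mk (pvFields.map (fun g => (g, w g)))) k ""))
        else PySem.Dict.mk (pvFields.map (fun g => (g, w g))))
      = PySem.Dict.mk (pvFields.map (fun g => (g,
          (fun f => if f = k ∧ P k = true then t (w f) else w f) g))) := by
    intro w k t hkmem
    have hcf : (pvFields.filter P).contains k = P k := by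
      by_cases hk : P k = true
      · simp [List.contains_iff_mem, List.mem_filter, hk, hkmem]
      · simp only [Bool.not_eq_true] at hk
        simp [List.contains_iff_mem, List.mem_filter, hk]
    rw [hcf]
    by_cases hk : P k = true
    · rw [hk, if_pos rfl, hget w k hkmem]
      apply PySem.Dict.ext
      rw [PySem.Dict.items_insert_of_contains _ _ (hcont w k hkmem)]
      dsimp only
      rw [List.map_map]
      apply List.map_congr_left
      intro f hf
      by_cases hfk : f = k
      · simp [hfk, hk]
      · simp [hfk, hk]
    · simp only [Bool.not_eq_true] at hk
      rw [hk]
      simp only [Bool.false_eq_true, if_false]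
      apply PySem.Dict.ext
      dsimp only
      apply List.map_congr_left
      intro f hf
      simp [hk]
  rw [hstep w3 "email" PySem.Str.lower (by decide), hstep _ "code" PySem.Str.upper (by decide)]
  dsimp only
  apply List.map_congr_left
  intro f hf
  fin_cases hf
  · by_cases hp : P "name" = true <;>
      simp only [hw3, hw2, hP] at hp ⊢ <;>
      simp_all [pvValB,
        (show PySem.Dict.contains pvLimits "name" = true from rfl),
        (show PySem.Dict.contains pvLimits "phone" = true from rfl),
        (show PySem.Dict.contains pvLimits "email" = true from rfl),
        (show PySem.Dict.contains pvLimits "address" = true from rfl),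
        (show PySem.Dict.contains pvLimits "code" = false from rfl),
        (show PySem.Dict.getD pvLimits "name" 0 = 100 from rfl),
        (show PySem.Dict.getD pvLimits "phone" 0 = 15 from rfl),
        (show PySem.Dict.getD pvLimits "email" 0 = 255 from rfl),
        (show PySem.Dict.getD pvLimits "address" 0 = 500 from rfl),
        (show PySem.Str.strip "" = "" from rfl),
        (show PySem.Str.slice "" none (some 100) = "" from rfl),
        (show PySem.Str.slice "" none (some 15) = "" from rfl),
        (show PySem.Str.slice "" none (some 255) = "" from rfl),
        (show PySem.Str.slice "" none (some 500) = "" from rfl),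
        PySem.Dict.getD_eq_get?_getD, PySem.Dict.contains_eq_isSome_get?]
  · by_cases hp : P "phone" = true <;>
      simp only [hw3, hw2, hP] at hp ⊢ <;>
      simp_all [pvValB,
        (show PySem.Dict.contains pvLimits "name" = true from rfl),
        (show PySem.Dict.contains pvLimits "phone" = true from rfl),
        (show PySem.Dict.contains pvLimits "email" = true from rfl),
        (show PySem.Dict.contains pvLimits "address" = true from rfl),
        (show PySem.Dict.contains pvLimits "code" = false from rfl),
        (show PySem.Dict.getD pvLimits "name" 0 = 100 from rfl),
        (show PySem.Dict.getD pvLimits "phone" 0 = 15 from rfl),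
        (show PySem.Dict.getD pvLimits "email" 0 = 255 from rfl),
        (show PySem.Dict.getD pvLimits "address" 0 = 500 from rfl),
        (show PySem.Str.strip "" = "" from rfl),
        (show PySem.Str.slice "" none (some 100) = "" from rfl),
        (show PySem.Str.slice "" none (some 15) = "" from rfl),
        (show PySem.Str.slice "" none (some 255) = "" from rfl),
        (show PySem.Str.slice "" none (some 500) = "" from rfl),
        PySem.Dict.getD_eq_get?_getD, PySem.Dict.contains_eq_isSome_get?]
  · by_cases hp : P "email" = true <;>
      simp only [hw3, hw2, hP] at hp ⊢ <;>
      simp_all [pvValB,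
        (show PySem.Dict.contains pvLimits "name" = true from rfl),
        (show PySem.Dict.contains pvLimits "phone" = true from rfl),
        (show PySem.Dict.contains pvLimits "email" = true from rfl),
        (show PySem.Dict.contains pvLimits "address" = true from rfl),
        (show PySem.Dict.contains pvLimits "code" = false from rfl),
        (show PySem.Dict.getD pvLimits "name" 0 = 100 from rfl),
        (show PySem.Dict.getD pvLimits "phone" 0 = 15 from rfl),
        (show PySem.Dict.getD pvLimits "email" 0 = 255 from rfl),
        (show PySem.Dict.getD pvLimits "address" 0 = 500 from rfl),
        (show PySem.Str.strip "" = "" from rfl),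
        (show PySem.Str.slice "" none (some 100) = "" from rfl),
        (show PySem.Str.slice "" none (some 15) = "" from rfl),
        (show PySem.Str.slice "" none (some 255) = "" from rfl),
        (show PySem.Str.slice "" none (some 500) = "" from rfl),
        PySem.Dict.getD_eq_get?_getD, PySem.Dict.contains_eq_isSome_get?]
  · by_cases hp : P "address" = true <;>
      simp only [hw3, hw2, hP] at hp ⊢ <;>
      simp_all [pvValB,
        (show PySem.Dict.contains pvLimits "name" = true from rfl),
        (show PySem.Dict.contains pvLimits "phone" = true from rfl),
        (show PySem.Dict.contains pvLimits "email" = true from rfl),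
        (show PySem.Dict.contains pvLimits "address" = true from rfl),
        (show PySem.Dict.contains pvLimits "code" = false from rfl),
        (show PySem.Dict.getD pvLimits "name" 0 = 100 from rfl),
        (show PySem.Dict.getD pvLimits "phone" 0 = 15 from rfl),
        (show PySem.Dict.getD pvLimits "email" 0 = 255 from rfl),
        (show PySem.Dict.getD pvLimits "address" 0 = 500 from rfl),
        (show PySem.Str.strip "" = "" from rfl),
        (show PySem.Str.slice "" none (some 100) = "" from rfl),
        (show PySem.Str.slice "" none (some 15) = "" from rfl),
        (show PySem.Str.slice "" none (some 255) = "" from rfl),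
        (show PySem.Str.slice "" none (some 500) = "" from rfl),
        PySem.Dict.getD_eq_get?_getD, PySem.Dict.contains_eq_isSome_get?]
  · by_cases hp : P "code" = true <;>
      simp only [hw3, hw2, hP] at hp ⊢ <;>
      simp_all [pvValB,
        (show PySem.Dict.contains pvLimits "name" = true from rfl),
        (show PySem.Dict.contains pvLimits "phone" = true from rfl),
        (show PySem.Dict.contains pvLimits "email" = true from rfl),
        (show PySem.Dict.contains pvLimits "address" = true from rfl),
        (show PySem.Dict.contains pvLimits "code" = false from rfl),
        (show PySem.Dict.getD pvLimits "name" 0 = 100 from rfl),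
        (show PySem.Dict.getD pvLimits "phone" 0 = 15 from rfl),
        (show PySem.Dict.getD pvLimits "email" 0 = 255 from rfl),
        (show PySem.Dict.getD pvLimits "address" 0 = 500 from rfl),
        (show PySem.Str.strip "" = "" from rfl),
        (show PySem.Str.slice "" none (some 100) = "" from rfl),
        (show PySem.Str.slice "" none (some 15) = "" from rfl),
        (show PySem.Str.slice "" none (some 255) = "" from rfl),
        (show PySem.Str.slice "" none (some 500) = "" from rfl),
        PySem.Dict.getD_eq_get?_getD, PySem.Dict.contains_eq_isSome_get?]

-- the two per-field values coincide on the five fields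
theorem pvVal_agree (d : PySem.Dict String String) :
    ∀ f ∈ pvFields, pvValA d f = pvValB d f := by
  intro f hf
  fin_cases hf <;>
    (simp only [pvValA, pvValB]
     cases h : PySem.Dict.get? d _ with
     | none =>
       simp [h, PySem.Dict.contains_eq_isSome_get?, PySem.Dict.getD_eq_get?_getD]
     | some v =>
       by_cases hv : v = "" <;>
         simp [h, hv, PySem.Dict.contains_eq_isSome_get?, PySem.Dict.getD_eq_get?_getD,
           (show PySem.Dict.get? pvLimits "name" = some 100 from rfl),
           (show PySem.Dict.get? pvLimits "phone" = some 15 from rfl),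
           (show PySem.Dict.get? pvLimits "email" = some 255 from rfl),
           (show PySem.Dict.get? pvLimits "address" = some 500 from rfl),
           (show PySem.Dict.get? pvLimits "code" = none from rfl)])

-- ===== VERDICT (by name: the statement is the Claim_ definition above) =====
theorem sanitize_customer_data_spec : Claim_equal_sanitize_customer_data := by
  intro data _
  unfold Spec_sanitize_customer_data
  rw [pvA_eq_map, pvB_eq_map]
  exact (List.map_congr_left (fun f hf => by rw [pvVal_agree (PySem.Dict.mk data) f hf]))
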